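-- pv_equiv track=rewrite | github.com/Youssef-Durgham/ai-video-factory | src/core/resource_coordinator.py | get_optimal_phase_order
-- ===== SOURCE A (Python) =====
-- from typing import Optional
--
-- GPU_REQUIREMENTS: dict[str, Optional[str]] = {
--     "research":      "qwen3.5:27b",
--     "seo":           "qwen3.5:27b",
--     "script":        "qwen3.5:27b",
--     "compliance":    "qwen3.5:27b",
--     "images":        "flux",
--     "image_qa":      "qwen3.5-27b:vision",
--     "image_regen":   "flux",
--     "video":         "ltx",
--     "video_qa":      "qwen3.5-27b:vision",
--     "video_regen":   "ltx",
--     "voice":         "fish_audio_s2_pro",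
--     "music":         "ace_step_1.5",
--     "sfx":           "moss_soundeffect",
--     "compose":       None,                  # CPU only (FFmpeg)
--     "overlay_qa":    "qwen3.5-27b:vision",
--     "final_qa":      "qwen3.5-27b:vision",
--     "manual_review": None,                  # Waiting for human
--     "publish":       "flux",                # Thumbnails
-- }
--
-- def get_optimal_phase_order(phases: list[str]) -> list[str]:
--     """
--     Reorder phases to minimize GPU swaps.
--     Groups phases by the model they need.
--
--     Example:
--       Input:  [images, voice, image_qa, music, video]
--       Output: [images, image_qa, video, voice, music]
--       (groups FLUX phases, then LTX, then audio models)
--     """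
--     # Group by required model
--     model_groups: dict[Optional[str], list[str]] = {}
--     for phase in phases:
--         model = GPU_REQUIREMENTS.get(phase)
--         model_groups.setdefault(model, []).append(phase)
--
--     # Order: keep original relative order within groups
--     # but group same-model phases together
--     result = []
--     seen_models = set()
--     for phase in phases:
--         model = GPU_REQUIREMENTS.get(phase)
--         if model not in seen_models:
--             seen_models.add(model)
--             result.extend(model_groups[model])
--
--     return result
-- ===== SOURCE B (Python) =====
-- from typing import Optional
--
-- GPU_REQUIREMENTS: dict[str, Optional[str]] = {
--     "research":      "qwen3.5:27b",
--     "seo":           "qwen3.5:27b",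
--     "script":        "qwen3.5:27b",
--     "compliance":    "qwen3.5:27b",
--     "images":        "flux",
--     "image_qa":      "qwen3.5-27b:vision",
--     "image_regen":   "flux",
--     "video":         "ltx",
--     "video_qa":      "qwen3.5-27b:vision",
--     "video_regen":   "ltx",
--     "voice":         "fish_audio_s2_pro",
--     "music":         "ace_step_1.5",
--     "sfx":           "moss_soundeffect",
--     "compose":       None,
--     "overlay_qa":    "qwen3.5-27b:vision",
--     "final_qa":      "qwen3.5-27b:vision",
--     "manual_review": None,
--     "publish":       "flux",
-- }
--
-- def get_optimal_phase_order(phases: list[str]) -> list[str]: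
--     # Repeatedly peel off the group of the first remaining phase:
--     # emit every remaining phase sharing its model (stable), drop them, repeat.
--     rest = list(phases)
--     result: list[str] = []
--     while rest:
--         m = GPU_REQUIREMENTS.get(rest[0])
--         result += [p for p in rest if GPU_REQUIREMENTS.get(p) == m]
--         rest = [p for p in rest if GPU_REQUIREMENTS.get(p) != m]
--     return result
-- ===== Notes on version B (the rewrite author's own statement) =====
-- stated objective: alternative
-- what changed: Instead of prebuilding a dict of per-model group lists and replaying the input under a seen-models set, B repeatedly peels off the group of the first remaining phase: emit all remaining phases with that model, remove them, and loop on the shrinking remainder (no dict, no seen-set).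
import Mathlib
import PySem

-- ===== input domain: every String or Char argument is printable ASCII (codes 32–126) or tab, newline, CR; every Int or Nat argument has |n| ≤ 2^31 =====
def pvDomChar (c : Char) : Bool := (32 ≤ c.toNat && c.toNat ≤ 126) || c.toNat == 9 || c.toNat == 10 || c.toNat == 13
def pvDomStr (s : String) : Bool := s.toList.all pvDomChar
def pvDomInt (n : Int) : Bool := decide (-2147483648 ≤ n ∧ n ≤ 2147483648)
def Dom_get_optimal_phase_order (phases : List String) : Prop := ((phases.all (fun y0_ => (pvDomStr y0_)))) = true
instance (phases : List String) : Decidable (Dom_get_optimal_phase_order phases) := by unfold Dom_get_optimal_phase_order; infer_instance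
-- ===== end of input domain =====

-- B replaces A's dict of group lists + seen-set replay by repeatedly peeling off the first remaining phase's model group (alternative decomposition; not faster).

-- module constant GPU_REQUIREMENTS (values Optional[str] → Option String)
def GPU_REQUIREMENTS : PySem.Dict String (Option String) :=
  PySem.Dict.ofList [
    ("research",      some "qwen3.5:27b"),
    ("seo",           some "qwen3.5:27b"),
    ("script",        some "qwen3.5:27b"),
    ("compliance",    some "qwen3.5:27b"),
    ("images",        some "flux"),
    ("image_qa",      some "qwen3.5-27b:vision"),
    ("image_regen",   some "flux"),
    ("video",         some "ltx"),
    ("video_qa",      some "qwen3.5-27b:vision"),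
    ("video_regen",   some "ltx"),
    ("voice",         some "fish_audio_s2_pro"),
    ("music",         some "ace_step_1.5"),
    ("sfx",           some "moss_soundeffect"),
    ("compose",       none),
    ("overlay_qa",    some "qwen3.5-27b:vision"),
    ("final_qa",      some "qwen3.5-27b:vision"),
    ("manual_review", none),
    ("publish",       some "flux")]

-- ===== PORT A =====
def get_optimal_phase_order (phases : List String) : List String :=
  -- model_groups.setdefault(model, []).append(phase) = modify model [] (· ++ [phase])
  let model_groups : PySem.Dict (Option String) (List String) :=
    phases.foldl (fun d p => d.modify (GPU_REQUIREMENTS.getD p none) [] (fun g => g ++ [p]))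
      PySem.Dict.empty
  -- second loop: result + seen; model_groups[model] cannot KeyError (the key was inserted
  -- by the first loop from the same phases), so getD _ [] is exact here
  let res := phases.foldl
    (fun (acc : List String × PySem.Set (Option String)) p =>
      let m := GPU_REQUIREMENTS.getD p none
      if PySem.Set.contains acc.2 m then acc
      else (acc.1 ++ model_groups.getD m [], PySem.Set.add acc.2 m))
    ([], PySem.Set.empty)
  res.1

-- ===== PORT B =====
-- the while loop of Source B: each round emits the first remaining phase's whole model group
-- and recurses on the phases of other models (rest strictly shrinks: its head is dropped)
def pvPeel : List String → List String
  | [] => []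
  | p :: t =>
    let m := GPU_REQUIREMENTS.getD p none
    ((p :: t).filter (fun q => GPU_REQUIREMENTS.getD q none == m)) ++
      pvPeel ((p :: t).filter (fun q => !(GPU_REQUIREMENTS.getD q none == m)))
termination_by l => l.length
decreasing_by
  simp only [List.filter_cons, BEq.rfl, Bool.not_true, List.length_cons]
  exact Nat.lt_succ_of_le (List.length_filter_le _ t)

def get_optimal_phase_order_alt (phases : List String) : List String :=
  pvPeel phases

-- ===== PRECONDITION & SPEC =====
def Spec_get_optimal_phase_order (phases : List String) (out : List String) : Prop := out = get_optimal_phase_order_alt phases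
instance (phases : List String) (out : List String) : Decidable (Spec_get_optimal_phase_order phases out) := by unfold Spec_get_optimal_phase_order; infer_instance

-- ===== CLAIM (what is proved, stated in full; the proofs are below) =====
def Claim_equal_get_optimal_phase_order : Prop := ∀ (phases : List String), Dom_get_optimal_phase_order phases → Spec_get_optimal_phase_order phases (get_optimal_phase_order phases)

-- ===== LEMMAS AND PROOFS =====

-- the models A's second loop encounters as new, in order, given an initial seen-set
def freshModels (s : PySem.Set (Option String)) : List String → List (Option String)
  | [] => []
  | p :: t =>
    let m := GPU_REQUIREMENTS.getD p none
    if PySem.Set.contains s m then freshModels s t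
    else m :: freshModels (PySem.Set.add s m) t

-- canonical form both ports are reduced to
def canon (l : List String) : List String :=
  (freshModels PySem.Set.empty l).flatMap
    (fun m => l.filter (fun p => GPU_REQUIREMENTS.getD p none == m))

theorem loopA_eq (g : Option String → List String) :
    ∀ (l : List String) (r : List String) (s : PySem.Set (Option String)),
      (l.foldl (fun (acc : List String × PySem.Set (Option String)) p =>
          let m := GPU_REQUIREMENTS.getD p none
          if PySem.Set.contains acc.2 m then acc
          else (acc.1 ++ g m, PySem.Set.add acc.2 m)) (r, s)).1
        = r ++ (freshModels s l).flatMap g := by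
  intro l
  induction l with
  | nil => intro r s; simp [freshModels]
  | cons p t ih =>
    intro r s
    simp only [List.foldl_cons, freshModels]
    by_cases h : GPU_REQUIREMENTS.getD p none ∈ s
    · simp [h] at ih ⊢
      exact ih r s
    · simp [h] at ih ⊢
      rw [ih, List.append_assoc]

theorem groups_getD (phases : List String) (c : Option String) :
    (phases.foldl (fun d p => d.modify (GPU_REQUIREMENTS.getD p none) [] (fun g => g ++ [p]))
        PySem.Dict.empty).getD c []
      = phases.filter (fun p => GPU_REQUIREMENTS.getD p none == c) := by
  have hmap : phases.foldl
      (fun d p => d.modify (GPU_REQUIREMENTS.getD p none) [] (fun g => g ++ [p])) PySem.Dict.empty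
    = (phases.map (fun p => (GPU_REQUIREMENTS.getD p none, p))).foldl
        (fun d q => d.modify q.1 [] (fun g => g ++ [q.2])) PySem.Dict.empty := by
    rw [List.foldl_map]
  rw [hmap, PySem.Dict.getD_foldl_modify_append]
  simp [List.filter_map, Function.comp_def]

theorem A_eq_canon (phases : List String) : get_optimal_phase_order phases = canon phases := by
  simp only [get_optimal_phase_order, canon]
  rw [loopA_eq (fun m =>
    (List.foldl (fun d p => d.modify (GPU_REQUIREMENTS.getD p none) [] fun g => g ++ [p])
      PySem.Dict.empty phases).getD m [])]
  simp only [groups_getD, List.nil_append]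

-- freshModels only reads the seen-set through membership of the models occurring in the list
theorem freshModels_congr :
    ∀ (t : List String) (s₁ s₂ : PySem.Set (Option String)),
      (∀ q ∈ t, (GPU_REQUIREMENTS.getD q none ∈ s₁ ↔ GPU_REQUIREMENTS.getD q none ∈ s₂)) →
      freshModels s₁ t = freshModels s₂ t := by
  intro t
  induction t with
  | nil => intro _ _ _; rfl
  | cons q t ih =>
    intro s₁ s₂ h
    have hq := h q (by simp)
    simp only [freshModels]
    by_cases h1 : GPU_REQUIREMENTS.getD q none ∈ s₁
    · have h2 : GPU_REQUIREMENTS.getD q none ∈ s₂ := hq.mp h1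
      rw [if_pos (by simp [h1]), if_pos (by simp [h2])]
      exact ih s₁ s₂ (fun x hx => h x (by simp [hx]))
    · have h2 : GPU_REQUIREMENTS.getD q none ∉ s₂ := fun hh => h1 (hq.mpr hh)
      rw [if_neg (by simp [h1]), if_neg (by simp [h2])]
      congr 1
      refine ih _ _ (fun x hx => ?_)
      simp only [PySem.Set.mem_add]
      rw [h x (by simp [hx])]

-- elements whose model is already seen may equivalently be filtered out beforehand
theorem freshModels_filter :
    ∀ (t : List String) (s : PySem.Set (Option String)) (m : Option String), m ∈ s →
      freshModels s (t.filter (fun q => !(GPU_REQUIREMENTS.getD q none == m)))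
        = freshModels s t := by
  intro t
  induction t with
  | nil => intro _ _ _; rfl
  | cons q t ih =>
    intro s m hm
    simp only [List.filter_cons]
    by_cases hq : GPU_REQUIREMENTS.getD q none = m
    · have hmem : GPU_REQUIREMENTS.getD q none ∈ s := hq ▸ hm
      rw [if_neg (by simp [hq]), ih s m hm]
      simp only [freshModels]
      rw [if_pos (by simp [hmem])]
    · rw [if_pos (by simp [hq])]
      simp only [freshModels]
      by_cases hqs : GPU_REQUIREMENTS.getD q none ∈ s
      · rw [if_pos (by simp [hqs]), if_pos (by simp [hqs])]
        exact ih s m hm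
      · rw [if_neg (by simp [hqs]), if_neg (by simp [hqs])]
        congr 1
        exact ih (PySem.Set.add s (GPU_REQUIREMENTS.getD q none)) m
          (by simp [PySem.Set.mem_add, hm])

theorem mem_freshModels_model :
    ∀ (t : List String) (s : PySem.Set (Option String)) (m' : Option String),
      m' ∈ freshModels s t → ∃ q ∈ t, GPU_REQUIREMENTS.getD q none = m' := by
  intro t
  induction t with
  | nil => intro s m' h; cases h
  | cons q t ih =>
    intro s m' h
    simp only [freshModels] at h
    by_cases hq : PySem.Set.contains s (GPU_REQUIREMENTS.getD q none) = true
    · rw [if_pos hq] at h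
      obtain ⟨r, hr, hrm⟩ := ih s m' h
      exact ⟨r, by simp [hr], hrm⟩
    · rw [if_neg hq] at h
      simp only [List.mem_cons] at h
      rcases h with h | h
      · exact ⟨q, by simp, h.symm⟩
      · obtain ⟨r, hr, hrm⟩ := ih _ m' h
        exact ⟨r, by simp [hr], hrm⟩

theorem peel_eq_canon : ∀ (n : Nat) (l : List String), l.length ≤ n → pvPeel l = canon l := by
  intro n
  induction n with
  | zero =>
    intro l hl
    have : l = [] := List.eq_nil_of_length_eq_zero (Nat.le_zero.mp hl)
    subst this
    simp [pvPeel, canon, freshModels]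
  | succ n ih =>
    intro l hl
    match l with
    | [] => simp [pvPeel, canon, freshModels]
    | p :: t =>
      set m := GPU_REQUIREMENTS.getD p none with hm
      set rest := (p :: t).filter (fun q => !(GPU_REQUIREMENTS.getD q none == m)) with hrest
      have h2 : rest = t.filter (fun q => !(GPU_REQUIREMENTS.getD q none == m)) := by
        simp [hrest, hm.symm]
      have hrlen : rest.length ≤ n := by
        rw [h2]
        exact Nat.le_of_lt_succ (Nat.lt_succ_of_le
          (Nat.le_trans (List.length_filter_le _ t) (by simpa using hl)))
      have hrec := ih rest hrlen
      -- unfold one step of pvPeel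
      have hpeel : pvPeel (p :: t) =
          ((p :: t).filter (fun q => GPU_REQUIREMENTS.getD q none == m)) ++ pvPeel rest := by
        rw [pvPeel]
      rw [hpeel, hrec]
      -- the fresh-model list of p :: t is m followed by that of rest
      have hfresh : freshModels PySem.Set.empty (p :: t)
          = m :: freshModels PySem.Set.empty rest := by
        simp only [freshModels]
        rw [if_neg (by simp [PySem.Set.empty])]
        congr 1
        rw [h2,
          ← freshModels_filter t (PySem.Set.add PySem.Set.empty m) m (by simp)]
        refine freshModels_congr _ (PySem.Set.add PySem.Set.empty m) PySem.Set.empty ?_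
        intro q hq
        have hqm : ¬ (GPU_REQUIREMENTS.getD q none = m) := by
          have := List.of_mem_filter hq
          simpa using this
        simp [PySem.Set.empty, hqm]
      unfold canon
      rw [hfresh]
      simp only [List.flatMap_cons]
      congr 1
      -- groups of the later models are unchanged by removing model-m phases
      have hsame : ∀ m' ∈ freshModels PySem.Set.empty rest,
          rest.filter (fun q => GPU_REQUIREMENTS.getD q none == m')
            = (p :: t).filter (fun q => GPU_REQUIREMENTS.getD q none == m') := by
        intro m' hm'
        obtain ⟨q, hq, hqm⟩ := mem_freshModels_model rest PySem.Set.empty m' hm'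
        have hqne : ¬ (GPU_REQUIREMENTS.getD q none = m) := by
          have := List.of_mem_filter hq
          simpa using this
        have hne : m' ≠ m := hqm ▸ hqne
        rw [hrest, List.filter_filter]
        congr 1
        funext r
        by_cases h : GPU_REQUIREMENTS.getD r none = m'
        · simp [h, hne]
        · simp [h]
      exact List.flatMap_congr hsame

-- ===== VERDICT (by name: the statement is the Claim_ definition above) =====
theorem get_optimal_phase_order_spec : Claim_equal_get_optimal_phase_order := by
  intro phases _
  unfold Spec_get_optimal_phase_order
  rw [A_eq_canon, get_optimal_phase_order_alt, peel_eq_canon phases.length phases le_rfl]
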